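-- pv_equiv track=rewrite | github.com/ksmfou98/Algorithm | programmers/약수의 합.py | solution
-- ===== SOURCE A (Python) =====
-- def solution(n):
--     if n == 1:
--         return 1
--
--     result = []
--     for i in range(1, n//2):
--         if n % i == 0:
--             result.append(i)
--             result.append(n//i)
--
--     result = set(result)
--     return sum(result)
-- ===== SOURCE B (Python) =====
-- def solution(n):
--     # Sum of all positive divisors of n, enumerating only up to sqrt(n).
--     total = 0
--     i = 1
--     while i * i <= n:
--         if n % i == 0:
--             total += i
--             j = n // i
--             if j != i:
--                 total += j
--         i += 1
--     return total
-- ===== Notes on version B (the rewrite author's own statement) =====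
-- stated objective: faster
-- what changed: Replaced A's O(n) scan over range(1, n//2) that collects divisor pairs into a list and deduplicates them with a set, by a single O(sqrt n) while-loop that enumerates i up to sqrt(n) and adds each divisor pair (i, n//i) at most once, with no intermediate collection.
-- intended difference: On n = 2, 3 and 4, A's loop range(1, n//2) stops before reaching every divisor pair and returns 0, 0 and 5; B returns the true divisor sums 3, 4 and 7, which is the intended value. — e.g. on solution(2): A returns 0, B returns 3
import Mathlib
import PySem

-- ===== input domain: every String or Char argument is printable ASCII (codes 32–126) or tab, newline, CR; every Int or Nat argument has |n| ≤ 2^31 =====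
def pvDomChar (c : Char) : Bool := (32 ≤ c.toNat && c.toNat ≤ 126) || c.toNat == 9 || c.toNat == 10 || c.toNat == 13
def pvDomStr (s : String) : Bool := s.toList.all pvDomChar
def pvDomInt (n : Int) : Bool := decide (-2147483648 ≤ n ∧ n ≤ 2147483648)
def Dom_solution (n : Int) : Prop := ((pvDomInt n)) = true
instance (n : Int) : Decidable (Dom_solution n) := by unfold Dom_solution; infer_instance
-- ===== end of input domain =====

-- B replaces A's scan up to n//2 (collecting divisor pairs into a set) by a single loop
-- up to sqrt(n) that adds each divisor pair at most once; B also returns the true divisor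
-- sum on n = 2, 3, 4, where A's range(1, n//2) misses divisors (see D_solution).

-- ===== PORT A =====
def solution (n : Int) : Int :=
  if n = 1 then 1
  else
    let result : List Int :=
      (PySem.List.pyRange 1 (PySem.Int.floordiv n 2) 1).foldl
        (fun r i =>
          if PySem.Int.mod n i = 0 then r ++ [i, PySem.Int.floordiv n i] else r) []
    (PySem.Set.ofList result).sum

-- ===== PORT B =====
-- 'while i * i <= n: … ; i += 1'  (terminates: the guard forces i ≤ n)
def altLoop (n i total : Int) : Int :=
  if _h : i * i ≤ n then
    altLoop n (i + 1)
      (if PySem.Int.mod n i = 0 then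
        (let j := PySem.Int.floordiv n i
         if j ≠ i then total + i + j else total + i)
       else total)
  else total
termination_by (n + 1 - i).toNat
decreasing_by
  have h0 : 0 ≤ n := le_trans (mul_self_nonneg i) _h
  have h1 : 2 * i - 1 ≤ n := by nlinarith [sq_nonneg (i - 1)]
  omega

def solution_alt (n : Int) : Int := altLoop n 1 0

-- ===== PRECONDITION & SPEC =====
-- On n = 2, 3 and 4, A's loop range(1, n//2) stops before reaching every divisor pair,
-- so A returns 0, 0 and 5; B returns the true divisor sums 3, 4 and 7, which is intended.
def D_solution (n : Int) : Prop := n = 2 ∨ n = 3 ∨ n = 4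
instance (n : Int) : Decidable (D_solution n) := by unfold D_solution; infer_instance

def Spec_solution (n : Int) (out : Int) : Prop := ¬ D_solution n → out = solution_alt n
instance (n : Int) (out : Int) : Decidable (Spec_solution n out) := by unfold Spec_solution; infer_instance

def pvDiffWitness_solution : Int := 2
def pvDiffWitnessOut_solution : Int × Int := (0, 3)

-- ===== CLAIM (what is proved, stated in full; the proofs are below) =====
def Claim_unchanged_solution : Prop := ∀ (n : Int), Dom_solution n → Spec_solution n (solution n)
def Claim_changed_solution : Prop := Dom_solution (pvDiffWitness_solution) ∧ D_solution (pvDiffWitness_solution) ∧ solution (pvDiffWitness_solution) = pvDiffWitnessOut_solution.1 ∧ solution_alt (pvDiffWitness_solution) = pvDiffWitnessOut_solution.2 ∧ pvDiffWitnessOut_solution.1 ≠ pvDiffWitnessOut_solution.2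
def Claim_exact_solution : Prop := ∀ (n : Int), Dom_solution n → D_solution n → solution n ≠ solution_alt n

-- ===== LEMMAS AND PROOFS =====

-- The per-iteration contribution of B's loop, stated over ℕ.
def fNat (m d : Nat) : Nat :=
  if d ∣ m then d + (if m / d ≠ d then m / d else 0) else 0

-- B's loop computes the sum of fNat over the remaining iterations i, …, √m.
theorem altLoop_sum (m : Nat) (i : Nat) (hi : 1 ≤ i) (t : Int) :
    altLoop (m : Int) (i : Int) t
      = t + ((∑ d ∈ Finset.Icc i (Nat.sqrt m), fNat m d : Nat) : Int) := by
  rw [altLoop]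
  by_cases hle : (i : Int) * i ≤ (m : Int)
  · have hs : i ≤ Nat.sqrt m := Nat.le_sqrt.mpr (by exact_mod_cast hle)
    rw [dif_pos hle, show ((i : Int) + 1) = ((i + 1 : Nat) : Int) by push_cast; ring,
       altLoop_sum m (i + 1) (by omega)]
    have hicc : Finset.Icc i (Nat.sqrt m) = insert i (Finset.Icc (i + 1) (Nat.sqrt m)) := by
      ext x; simp only [Finset.mem_Icc, Finset.mem_insert]; omega
    rw [hicc, Finset.sum_insert (by simp)]
    have hmod : (PySem.Int.mod (m : Int) (i : Int) = 0) ↔ i ∣ m := by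
      rw [PySem.Int.mod_eq_zero_iff_dvd]; exact Int.natCast_dvd_natCast
    have hfd : PySem.Int.floordiv (m : Int) (i : Int) = ((m / i : Nat) : Int) :=
      PySem.Int.floordiv_natCast m i
    by_cases hdvd : i ∣ m
    · rw [if_pos (hmod.mpr hdvd)]
      simp only [hfd]
      by_cases hne : m / i ≠ i
      · rw [if_pos (by exact_mod_cast hne), fNat, if_pos hdvd, if_pos hne]
        push_cast; ring
      · rw [if_neg (fun hc => hc (by exact_mod_cast not_not.mp hne)), fNat,
          if_pos hdvd, if_neg hne]
        push_cast [not_not.mp hne]; ring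
    · rw [if_neg (fun h => hdvd (hmod.mp h)), fNat, if_neg hdvd]
      push_cast; ring
  · have hs : Nat.sqrt m < i := by
      by_contra hc
      exact hle (by exact_mod_cast Nat.le_sqrt.mp (le_of_not_gt hc))
    rw [dif_neg hle, Finset.Icc_eq_empty (by omega), Finset.sum_empty]
    simp
termination_by Nat.sqrt m + 1 - i
decreasing_by omega

-- Pairing d ↦ m / d: the √-bounded sum of fNat is the full divisor sum.
theorem sqrt_sum_eq_divisor_sum (m : Nat) (hm : 1 ≤ m) :
    ∑ d ∈ Finset.Icc 1 (Nat.sqrt m), fNat m d = ∑ d ∈ m.divisors, d := by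
  have hm0 : m ≠ 0 := by omega
  have hsq : Nat.sqrt m * Nat.sqrt m ≤ m := Nat.sqrt_le m
  have hsq' : m < (Nat.sqrt m + 1) * (Nat.sqrt m + 1) := Nat.lt_succ_sqrt m
  have h1 : ∑ d ∈ Finset.Icc 1 (Nat.sqrt m), fNat m d
      = ∑ d ∈ (Finset.Icc 1 (Nat.sqrt m)).filter (· ∣ m),
          (d + if m / d ≠ d then m / d else 0) := by
    rw [Finset.sum_filter]; rfl
  have h2 : (Finset.Icc 1 (Nat.sqrt m)).filter (· ∣ m)
      = m.divisors.filter (· ≤ Nat.sqrt m) := by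
    ext d
    simp only [Finset.mem_filter, Finset.mem_Icc, Nat.mem_divisors]
    constructor
    · rintro ⟨⟨h1, h2⟩, h3⟩; exact ⟨⟨h3, hm0⟩, h2⟩
    · rintro ⟨⟨h3, _⟩, h2⟩; exact ⟨⟨Nat.pos_of_dvd_of_pos h3 hm, h2⟩, h3⟩
  have h3 : ∑ d ∈ m.divisors.filter (· ≤ Nat.sqrt m),
        (if m / d ≠ d then m / d else 0)
      = ∑ d ∈ m.divisors.filter (fun d => d ≤ Nat.sqrt m ∧ m / d ≠ d), m / d := by
    rw [Finset.sum_filter, Finset.sum_filter]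
    refine Finset.sum_congr rfl fun d _ => ?_
    by_cases h : d ≤ Nat.sqrt m <;> by_cases h' : m / d ≠ d <;> simp [h, h']
  have hbij : ∑ d ∈ m.divisors.filter (fun d => d ≤ Nat.sqrt m ∧ m / d ≠ d), m / d
      = ∑ e ∈ m.divisors.filter (fun e => ¬ e ≤ Nat.sqrt m), e := by
    refine Finset.sum_nbij' (fun d => m / d) (fun e => m / e) ?_ ?_ ?_ ?_ ?_
    · rintro d hd
      simp only [Finset.mem_filter, Nat.mem_divisors] at hd ⊢
      obtain ⟨⟨hdvd, _⟩, hds, hne⟩ := hd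
      have hprod : d * (m / d) = m := Nat.mul_div_cancel' hdvd
      refine ⟨⟨Nat.div_dvd_of_dvd hdvd, hm0⟩, fun hle => ?_⟩
      have hd1 : 1 ≤ d := Nat.pos_of_dvd_of_pos hdvd hm
      have hq1 : 1 ≤ m / d := Nat.pos_of_dvd_of_pos (Nat.div_dvd_of_dvd hdvd) hm
      have : d = m / d := by nlinarith
      exact hne this.symm
    · rintro e he
      simp only [Finset.mem_filter, Nat.mem_divisors, not_le] at he ⊢
      obtain ⟨⟨hdvd, _⟩, hgt⟩ := he
      have hprod : e * (m / e) = m := Nat.mul_div_cancel' hdvd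
      have hle : m / e ≤ Nat.sqrt m := by nlinarith
      refine ⟨⟨Nat.div_dvd_of_dvd hdvd, hm0⟩, hle, ?_⟩
      rw [Nat.div_div_self hdvd hm0]
      omega
    · rintro d hd
      simp only [Finset.mem_filter, Nat.mem_divisors] at hd
      exact Nat.div_div_self hd.1.1 hm0
    · rintro e he
      simp only [Finset.mem_filter, Nat.mem_divisors] at he
      exact Nat.div_div_self he.1.1 hm0
    · exact fun d _ => rfl
  calc ∑ d ∈ Finset.Icc 1 (Nat.sqrt m), fNat m d
      = ∑ d ∈ m.divisors.filter (· ≤ Nat.sqrt m),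
          (d + if m / d ≠ d then m / d else 0) := by rw [h1, h2]
    _ = ∑ d ∈ m.divisors.filter (· ≤ Nat.sqrt m), d
        + ∑ d ∈ m.divisors.filter (fun e => ¬ e ≤ Nat.sqrt m), d := by
          rw [Finset.sum_add_distrib, h3, hbij]
    _ = ∑ d ∈ m.divisors, d := Finset.sum_filter_add_sum_filter_not _ _ _

theorem alt_eq_sigma (n : Int) (hn : 1 ≤ n) :
    solution_alt n = ((∑ d ∈ n.toNat.divisors, d : Nat) : Int) := by
  lift n to ℕ using (by omega) with m
  have hm : 1 ≤ m := by exact_mod_cast hn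
  rw [solution_alt, show ((1 : Int)) = ((1 : ℕ) : Int) from rfl,
    altLoop_sum m 1 le_rfl 0, sqrt_sum_eq_divisor_sum m hm, zero_add, Int.toNat_natCast]

theorem sol_nonpos (n : Int) (hn : n ≤ 0) : solution n = 0 := by
  rw [solution, if_neg (by omega)]
  have hb : PySem.Int.floordiv n 2 ≤ 1 := by
    rw [PySem.Int.floordiv_eq_ediv_of_pos (by norm_num)]; omega
  rw [PySem.List.pyRange_one_eq_nil hb]
  rfl

theorem alt_nonpos (n : Int) (hn : n ≤ 0) : solution_alt n = 0 := by
  rw [solution_alt, altLoop]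
  rw [dif_neg (by omega)]

theorem sol_eq_sigma (n : Int) (hn : 5 ≤ n) :
    solution n = ((∑ d ∈ n.toNat.divisors, d : Nat) : Int) := by
  lift n to ℕ using (by omega) with m
  have hm : 5 ≤ m := by exact_mod_cast hn
  have hm0 : m ≠ 0 := by omega
  rw [solution, if_neg (by omega)]
  simp only []
  have hfun : (fun (r : List Int) i =>
      if PySem.Int.mod (m : Int) i = 0 then r ++ [i, PySem.Int.floordiv (m : Int) i] else r)
      = fun r i => r ++ (if PySem.Int.mod (m : Int) i = 0
                          then [i, PySem.Int.floordiv (m : Int) i] else []) := by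
    funext r i; split <;> simp
  rw [hfun, PySem.List.foldl_append_eq_flatMap, List.nil_append]
  rw [show ((2 : Int)) = ((2 : ℕ) : Int) from rfl, PySem.Int.floordiv_natCast m 2]
  set L := (PySem.List.pyRange 1 ((m / 2 : ℕ) : Int) 1).flatMap
      (fun i => if PySem.Int.mod (m : Int) i = 0
                then [i, PySem.Int.floordiv (m : Int) i] else []) with hL
  rw [← PySem.List.dedup_eq_ofList]
  have hsum : (PySem.List.dedup L).sum = (PySem.List.dedup L).toFinset.sum id := by
    rw [List.sum_toFinset _ (PySem.List.nodup_dedup L), List.map_id]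
  rw [hsum]
  have hfin : (PySem.List.dedup L).toFinset = m.divisors.image (fun d : ℕ => (d : Int)) := by
    ext x
    simp only [List.mem_toFinset, PySem.List.mem_dedup, Finset.mem_image, Nat.mem_divisors, hL,
      List.mem_flatMap, PySem.List.mem_pyRange_one]
    constructor
    · rintro ⟨i, ⟨hi1, hi2⟩, hx⟩
      by_cases hmod : PySem.Int.mod (m : Int) i = 0
      · rw [if_pos hmod] at hx
        have hdvd : i ∣ (m : Int) := (PySem.Int.mod_eq_zero_iff_dvd _ _).mp hmod
        have hie : i = ((i.toNat : ℕ) : Int) := by omega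
        rw [hie] at hdvd hx
        have hdm : i.toNat ∣ m := by exact_mod_cast hdvd
        simp only [List.mem_cons, List.not_mem_nil, or_false] at hx
        rcases hx with rfl | rfl
        · exact ⟨i.toNat, ⟨hdm, hm0⟩, rfl⟩
        · exact ⟨m / i.toNat, ⟨Nat.div_dvd_of_dvd hdm, hm0⟩,
            (PySem.Int.floordiv_natCast m i.toNat).symm⟩
      · rw [if_neg hmod] at hx; exact absurd hx (List.not_mem_nil)
    · rintro ⟨d, ⟨hdvd, _⟩, rfl⟩
      have hd1 : 1 ≤ d := Nat.pos_of_dvd_of_pos hdvd (by omega)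
      have hdm : d ≤ m := Nat.le_of_dvd (by omega) hdvd
      by_cases hsmall : d < m / 2
      · refine ⟨(d : Int), ⟨by exact_mod_cast hd1, by exact_mod_cast hsmall⟩, ?_⟩
        rw [if_pos ((PySem.Int.mod_eq_zero_iff_dvd _ _).mpr (by exact_mod_cast hdvd))]
        simp
      · set k := m / d with hkdef
        have hk : d * k = m := Nat.mul_div_cancel' hdvd
        have hk1 : 1 ≤ k := Nat.one_le_div_iff (by omega) |>.mpr hdm
        have hk3 : ¬ 3 ≤ k := by
          intro h3
          have : 3 * d ≤ m := by calc 3 * d ≤ k * d := Nat.mul_le_mul_right d h3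
                                      _ = m := by rw [Nat.mul_comm]; exact hk
          omega
        interval_cases k
        · -- k = 1 : d = m, produced as m // 1 at i = 1
          refine ⟨1, ⟨le_refl _, by exact_mod_cast (show 1 < m / 2 by omega)⟩, ?_⟩
          rw [if_pos (by rw [PySem.Int.mod_eq_zero_iff_dvd]; exact one_dvd _)]
          have : PySem.Int.floordiv (m : Int) 1 = ((m : ℕ) : Int) := by
            rw [show ((1 : Int)) = ((1 : ℕ) : Int) from rfl, PySem.Int.floordiv_natCast m 1,
              Nat.div_one]
          rw [this]
          have hdm' : d = m := by omega
          simp [hdm']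
        · -- k = 2 : d = m / 2, produced as m // 2 at i = 2
          have hd2 : m = 2 * d := by omega
          refine ⟨2, ⟨by norm_num, by exact_mod_cast (show 2 < m / 2 by omega)⟩, ?_⟩
          rw [if_pos (by rw [PySem.Int.mod_eq_zero_iff_dvd]; exact ⟨d, by exact_mod_cast hd2⟩)]
          have : PySem.Int.floordiv (m : Int) 2 = ((m / 2 : ℕ) : Int) := by
            rw [show ((2 : Int)) = ((2 : ℕ) : Int) from rfl, PySem.Int.floordiv_natCast m 2]
          rw [this]
          have : m / 2 = d := by omega
          simp [this]
  rw [hfin, Finset.sum_image (fun a _ b _ h => Nat.cast_inj.mp h)]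
  simp [Int.toNat_natCast]

-- ===== VERDICT (by name: the statement is the Claim_ definition above) =====
theorem solution_spec : Claim_unchanged_solution := by
  intro n _ hD
  unfold D_solution at hD
  simp only [not_or] at hD
  rcases lt_or_ge n 1 with h | h
  · rw [sol_nonpos n (by omega), alt_nonpos n (by omega)]
  · rcases lt_or_ge n 5 with h5 | h5
    · have : n = 1 := by omega
      subst this
      rw [alt_eq_sigma 1 (by norm_num)]; decide
    · rw [sol_eq_sigma n h5, alt_eq_sigma n (by omega)]

theorem solution_changed : Claim_changed_solution := by
  unfold Claim_changed_solution
  refine ⟨by decide, by decide, by decide, ?_, by decide⟩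
  rw [pvDiffWitness_solution, alt_eq_sigma 2 (by norm_num)]; decide

theorem solution_tight : Claim_exact_solution := by
  intro n _ hD
  have h1 : (1 : Int) ≤ n := by rcases hD with h | h | h <;> omega
  rw [alt_eq_sigma n h1]
  rcases hD with h | h | h <;> subst h <;> decide
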